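-- pv_equiv track=rewrite | github.com/KotenUnder/LisJong | LisJongUtils.py | shanten_sevenpairs
-- ===== SOURCE A (Python) =====
-- def shanten_sevenpairs(tileliststr_):
--     # 長さが足りない場合はそもそもなし
--     if len(tileliststr_) < 2 * 13:
--         return 6
--
--
--     pairs = 0
--     # 0 を 5 に書き換える
--     tileliststr_ = tileliststr_.replace('0', '5')
--     # 仮実装　トイツだけみる
--     needle = 0
--     while needle <= 12:
--         if tileliststr_[needle*2:needle*2+2] == tileliststr_[needle*2+2:needle*2+4]:
--             pairs += 1
--             needle += 2
--         else:
--             needle += 1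
--
--     return 6 - pairs
-- ===== SOURCE B (Python) =====
-- def shanten_sevenpairs(tileliststr_):
--     # Same guard and '0'->'5' normalisation; then a run-length pass:
--     # greedy adjacent pairing over the 14 two-char tile slots equals the sum
--     # of floor(run/2) over maximal runs of equal consecutive slots.
--     if len(tileliststr_) < 2 * 13:
--         return 6
--     s = tileliststr_.replace('0', '5')
--     chunks = [s[2 * i:2 * i + 2] for i in range(14)]
--     pairs = 0
--     run = 1
--     for prev, cur in zip(chunks, chunks[1:]):
--         if cur == prev:
--             run += 1
--         else:
--             pairs += run // 2
--             run = 1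
--     pairs += run // 2
--     return 6 - pairs
-- ===== Notes on version B (the rewrite author's own statement) =====
-- stated objective: alternative
-- what changed: Replaces A's jump-by-2 greedy pointer over string indices with a run-length pass: split the first 28 chars into 14 two-char slots and sum floor(runlength/2) over maximal runs of equal consecutive slots, which provably equals greedy adjacent pairing.
import Mathlib
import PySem

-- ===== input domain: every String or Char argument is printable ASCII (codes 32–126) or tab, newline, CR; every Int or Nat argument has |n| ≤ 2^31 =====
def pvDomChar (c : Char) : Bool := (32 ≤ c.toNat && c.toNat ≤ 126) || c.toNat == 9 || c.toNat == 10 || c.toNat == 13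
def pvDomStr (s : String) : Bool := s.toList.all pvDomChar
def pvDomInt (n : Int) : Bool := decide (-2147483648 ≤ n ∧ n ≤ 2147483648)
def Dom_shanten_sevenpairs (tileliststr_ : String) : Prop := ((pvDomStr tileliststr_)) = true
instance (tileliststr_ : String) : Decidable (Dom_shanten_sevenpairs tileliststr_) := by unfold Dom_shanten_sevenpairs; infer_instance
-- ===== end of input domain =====

-- ===== PORT A =====
-- B replaces A's jump-by-2 greedy pointer with a run-length pass over the 14 tile slots (alternative decomposition, same cost).
-- A-side loop: while needle <= 12: compare s[needle*2:needle*2+2] with s[needle*2+2:needle*2+4]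
def pvLoopA (t : List Char) (needle : Int) (pairs : Int) : Int :=
  if needle ≤ 12 then
    if PySem.List.slice t (some (needle * 2)) (some (needle * 2 + 2)) =
       PySem.List.slice t (some (needle * 2 + 2)) (some (needle * 2 + 4)) then
      pvLoopA t (needle + 2) (pairs + 1)
    else
      pvLoopA t (needle + 1) pairs
  else pairs
termination_by (13 - needle).toNat
decreasing_by all_goals omega

def shanten_sevenpairs (tileliststr_ : String) : Int :=
  if PySem.Str.len tileliststr_ < 2 * 13 then 6
  else
    let t := PySem.Chars.replace tileliststr_.toList ['0'] ['5']
    6 - pvLoopA t 0 0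

-- ===== PORT B =====
-- one step of B's for-loop over zip(chunks, chunks[1:]): state (pairs, run)
def pvStepB (pr : Int × Int) (pc : List Char × List Char) : Int × Int :=
  if pc.2 = pc.1 then (pr.1, pr.2 + 1) else (pr.1 + PySem.Int.floordiv pr.2 2, 1)

def shanten_sevenpairs_alt (tileliststr_ : String) : Int :=
  if PySem.Str.len tileliststr_ < 2 * 13 then 6
  else
    let s := PySem.Chars.replace tileliststr_.toList ['0'] ['5']
    let chunks := (PySem.List.pyRange 0 14 1).map
      (fun i => PySem.List.slice s (some (2 * i)) (some (2 * i + 2)))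
    let res := (chunks.zip chunks.tail).foldl pvStepB (0, 1)
    6 - (res.1 + PySem.Int.floordiv res.2 2)

-- ===== PRECONDITION & SPEC =====
def Spec_shanten_sevenpairs (tileliststr_ : String) (out : Int) : Prop := out = shanten_sevenpairs_alt tileliststr_
instance (tileliststr_ : String) (out : Int) : Decidable (Spec_shanten_sevenpairs tileliststr_ out) := by unfold Spec_shanten_sevenpairs; infer_instance

-- ===== CLAIM (what is proved, stated in full; the proofs are below) =====
def Claim_equal_shanten_sevenpairs : Prop := ∀ (tileliststr_ : String), Dom_shanten_sevenpairs tileliststr_ → Spec_shanten_sevenpairs tileliststr_ (shanten_sevenpairs tileliststr_)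

-- ===== LEMMAS AND PROOFS =====

-- greedy adjacent pairing (what A's pointer computes, over the list of 2-char slots)
def pvGreedy : List (List Char) → Nat
  | [] => 0
  | [_] => 0
  | a :: b :: r => if a = b then 1 + pvGreedy r else pvGreedy (b :: r)

-- run-length pairing (what B's pass computes): prev slot, current run length, rest
def pvRb : List Char → Nat → List (List Char) → Nat
  | _, r, [] => r / 2
  | p, r, c :: cs => if c = p then pvRb c (r + 1) cs else r / 2 + pvRb c 1 cs

theorem pvRb_greedy : ∀ (xs : List (List Char)) (a : List Char) (k : Nat),
    pvRb a (2 * k + 1) xs = k + pvGreedy (a :: xs) ∧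
    pvRb a (2 * k + 2) xs = (k + 1) + pvGreedy xs := by
  intro xs
  induction xs with
  | nil =>
      intro a k
      simp [pvRb, pvGreedy]
      omega
  | cons b xs ih =>
      intro a k
      have hodd0 : pvRb b 1 xs = pvGreedy (b :: xs) := by
        have := (ih b 0).1
        simpa using this
      constructor
      · rw [pvRb]
        by_cases h : b = a
        · subst h
          rw [if_pos rfl, show 2 * k + 1 + 1 = 2 * k + 2 from rfl, (ih b k).2]
          rw [pvGreedy, if_pos rfl]
          omega
        · rw [if_neg h, hodd0, pvGreedy, if_neg (fun hh => h hh.symm)]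
          omega
      · rw [pvRb]
        by_cases h : b = a
        · subst h
          rw [if_pos rfl, show 2 * k + 2 + 1 = 2 * (k + 1) + 1 from by ring, (ih b (k + 1)).1]
        · rw [if_neg h, hodd0]
          omega

-- the 2-char slot i of t, and the slots from n to 13
def pvChunk (t : List Char) (i : Nat) : List Char :=
  PySem.List.slice t (some (2 * (i : Int))) (some (2 * (i : Int) + 2))

def pvChunks (t : List Char) (n : Nat) : List (List Char) :=
  (List.range' n (14 - n)).map (pvChunk t)

theorem pvLoopA_eq_greedy : ∀ (fuel m : Nat) (t : List Char) (p : Int), 14 - m ≤ fuel →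
    pvLoopA t (m : Int) p = p + (pvGreedy (pvChunks t m) : Int) := by
  intro fuel
  induction fuel with
  | zero =>
      intro m t p h
      rw [pvLoopA, if_neg (by omega)]
      have h0 : 14 - m = 0 := by omega
      simp [pvChunks, h0, pvGreedy]
  | succ f ih =>
      intro m t p h
      rw [pvLoopA]
      by_cases hm : m ≤ 12
      · rw [if_pos (by exact_mod_cast hm)]
        have hslice1 : PySem.List.slice t (some ((m : Int) * 2)) (some ((m : Int) * 2 + 2)) = pvChunk t m := by
          rw [pvChunk]; ring_nf
        have hslice2 : PySem.List.slice t (some ((m : Int) * 2 + 2)) (some ((m : Int) * 2 + 4)) = pvChunk t (m + 1) := by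
          rw [pvChunk]; push_cast; ring_nf
        rw [hslice1, hslice2]
        have hchunks : pvChunks t m = pvChunk t m :: pvChunk t (m + 1) :: pvChunks t (m + 2) := by
          rw [pvChunks, pvChunks, show 14 - m = (14 - (m + 2)) + 1 + 1 from by omega,
              List.range'_succ, List.range'_succ]
          simp
        by_cases he : pvChunk t m = pvChunk t (m + 1)
        · rw [if_pos he]
          have hc : ((m : Int) + 2) = ((m + 2 : Nat) : Int) := by push_cast; ring
          rw [hc, ih (m + 2) t (p + 1) (by omega)]
          rw [hchunks, pvGreedy, if_pos he]
          push_cast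
          ring
        · rw [if_neg he]
          have hc : ((m : Int) + 1) = ((m + 1 : Nat) : Int) := by push_cast; ring
          rw [hc, ih (m + 1) t p (by omega)]
          have hch1 : pvChunks t (m + 1) = pvChunk t (m + 1) :: pvChunks t (m + 2) := by
            rw [pvChunks, pvChunks, show 14 - (m + 1) = (14 - (m + 2)) + 1 from by omega,
                List.range'_succ]
            simp
          rw [hchunks, pvGreedy, if_neg he, hch1]
      · rw [if_neg (by exact_mod_cast hm)]
        have h13 : m = 13 ∨ 14 ≤ m := by omega
        rcases h13 with h13 | h13
        · subst h13
          have hone : pvChunks t 13 = [pvChunk t 13] := by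
            rw [pvChunks]
            norm_num
          rw [hone, pvGreedy]
          simp
        · have h0 : 14 - m = 0 := by omega
          simp [pvChunks, h0, pvGreedy]

theorem pvFold_eq_rb : ∀ (cs : List (List Char)) (prev : List Char) (p : Int) (r : Nat),
    (((prev :: cs).zip cs).foldl pvStepB (p, (r : Int))).1 +
      PySem.Int.floordiv (((prev :: cs).zip cs).foldl pvStepB (p, (r : Int))).2 2
    = p + (pvRb prev r cs : Int) := by
  intro cs
  induction cs with
  | nil =>
      intro prev p r
      simp [pvRb]
  | cons c cs ih =>
      intro prev p r
      simp only [List.zip_cons_cons, List.foldl_cons]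
      rw [pvStepB]
      by_cases h : c = prev
      · simp only [if_pos h]
        have hc : ((r : Int) + 1) = ((r + 1 : Nat) : Int) := by push_cast; ring
        rw [hc, ih c p (r + 1), pvRb, if_pos h]
      · simp only [if_neg h]
        have hc : ((1 : Int)) = ((1 : Nat) : Int) := rfl
        rw [hc, ih c _ 1, pvRb, if_neg h]
        rw [show (2 : Int) = ((2 : Nat) : Int) from rfl, PySem.Int.floordiv_natCast]
        push_cast
        ring

theorem pvChunksB_eq : ∀ (t : List Char),
    (PySem.List.pyRange 0 14 1).map
      (fun i => PySem.List.slice t (some (2 * i)) (some (2 * i + 2))) = pvChunks t 0 := by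
  intro t
  rw [show PySem.List.pyRange 0 14 1 = [0,1,2,3,4,5,6,7,8,9,10,11,12,13] from by decide]
  rw [pvChunks, show (14 - 0) = 14 from rfl,
      show List.range' 0 14 = [0,1,2,3,4,5,6,7,8,9,10,11,12,13] from by rfl]
  simp [pvChunk]

-- ===== VERDICT (by name: the statement is the Claim_ definition above) =====
theorem shanten_sevenpairs_spec : Claim_equal_shanten_sevenpairs := by
  intro s _
  unfold Spec_shanten_sevenpairs shanten_sevenpairs shanten_sevenpairs_alt
  by_cases hlen : PySem.Str.len s < 2 * 13
  · rw [if_pos hlen, if_pos hlen]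
  · rw [if_neg hlen, if_neg hlen]
    set t := PySem.Chars.replace s.toList ['0'] ['5'] with ht
    simp only
    rw [pvChunksB_eq t]
    have hch : pvChunks t 0 = pvChunk t 0 :: (List.range' 1 13).map (pvChunk t) := by
      rw [pvChunks, show (14 - 0) = 13 + 1 from rfl, List.range'_succ]
      simp
    have hA : pvLoopA t 0 0 = (pvGreedy (pvChunks t 0) : Int) := by
      have := pvLoopA_eq_greedy 14 0 t 0 (by omega)
      simpa using this
    have hB : (((pvChunks t 0).zip (pvChunks t 0).tail).foldl pvStepB (0, 1)).1 +
        PySem.Int.floordiv (((pvChunks t 0).zip (pvChunks t 0).tail).foldl pvStepB (0, 1)).2 2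
        = (pvGreedy (pvChunks t 0) : Int) := by
      rw [hch]
      simp only [List.tail_cons]
      have h1 := pvFold_eq_rb ((List.range' 1 13).map (pvChunk t)) (pvChunk t 0) 0 1
      have h2 := (pvRb_greedy ((List.range' 1 13).map (pvChunk t)) (pvChunk t 0) 0).1
      norm_num at h1 h2 ⊢
      rw [h1, h2]
    rw [hA, hB]
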